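-- pv_equiv track=rewrite | github.com/jimporter/bfg9000 | src/utils.py | tween
-- ===== SOURCE A (Python) =====
-- def tween(iterable, delim, prefix=None, suffix=None):
--     first = True
--     for i in iterable:
--         if first:
--             first = False
--             if prefix is not None:
--                 yield True, prefix
--         else:
--             yield True, delim
--         yield False, i
--     if not first and suffix is not None:
--         yield True, suffix
-- ===== SOURCE B (Python) =====
-- def tween(iterable, delim, prefix=None, suffix=None):
--     # Staged "join-then-cut" construction: build a uniform delimited block for
--     # every item, slice off the spurious leading delimiter, then concatenate
--     # the optional prefix/suffix parts around it.
--     items = list(iterable)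
--     if not items:
--         return
--     body = [pair for i in items for pair in ((True, delim), (False, i))][1:]
--     head = [(True, prefix)] if prefix is not None else []
--     tail = [(True, suffix)] if suffix is not None else []
--     yield from head + body + tail
-- ===== Notes on version B (the rewrite author's own statement) =====
-- stated objective: alternative
-- what changed: B replaces A's stateful first-flag generator loop with a staged join-then-cut construction: it materialises a uniform (delim,item) pair block for every item, slices off the spurious leading delimiter, and concatenates prefix/body/suffix lists.
import Mathlib
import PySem

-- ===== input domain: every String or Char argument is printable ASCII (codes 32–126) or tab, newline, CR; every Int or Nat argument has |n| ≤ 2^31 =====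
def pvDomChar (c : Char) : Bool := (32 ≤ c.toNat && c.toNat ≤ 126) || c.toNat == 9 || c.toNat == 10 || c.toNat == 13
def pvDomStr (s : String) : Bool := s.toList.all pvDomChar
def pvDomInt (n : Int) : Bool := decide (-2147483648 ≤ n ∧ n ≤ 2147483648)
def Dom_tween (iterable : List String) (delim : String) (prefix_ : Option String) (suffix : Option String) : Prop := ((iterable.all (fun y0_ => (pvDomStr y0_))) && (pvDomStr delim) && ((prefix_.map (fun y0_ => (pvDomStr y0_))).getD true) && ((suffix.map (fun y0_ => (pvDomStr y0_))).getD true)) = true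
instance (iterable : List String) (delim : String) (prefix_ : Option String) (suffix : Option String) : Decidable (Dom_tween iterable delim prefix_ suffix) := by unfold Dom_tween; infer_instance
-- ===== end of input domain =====

-- B replaces A's first-flag generator loop with a staged join-then-cut list construction (uniform pair block for every item, leading delimiter sliced off); objective: alternative, same cost. Equivalence is about the yielded sequence (both Pythons are generators; B materialises the input list eagerly).


-- ===== PORT A =====
-- port of A: foldl over the list carrying the 'first' flag, then the suffix check
def tweenLoop (delim : String) (prefix_ : Option String) (iterable : List String)
    (st : List (Bool × String) × Bool) : List (Bool × String) × Bool :=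
  iterable.foldl (fun (st : List (Bool × String) × Bool) i =>
    let (out, first) := st
    if first then
      (out ++ (match prefix_ with | some p => [(true, p)] | none => []) ++ [(false, i)], false)
    else
      (out ++ [(true, delim), (false, i)], false)) st

def tween (iterable : List String) (delim : String) (prefix_ : Option String) (suffix : Option String) : List (Bool × String) :=
  let st := tweenLoop delim prefix_ iterable ([], true)
  if st.2 = false then
    match suffix with
    | some s => st.1 ++ [(true, s)]
    | none => st.1
  else st.1

-- ===== PORT B =====
-- port of B: staged join-then-cut — uniform pair block for every item (flatMap = the
-- double comprehension), then the [1:] slice (PySem.List.slice, exact for Python [1:]),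
-- then head ++ body ++ tail
def tween_alt (iterable : List String) (delim : String) (prefix_ : Option String) (suffix : Option String) : List (Bool × String) :=
  if iterable = [] then []
  else
    let body := PySem.List.slice (iterable.flatMap (fun i => [(true, delim), (false, i)])) (some 1) none
    let head := match prefix_ with | some p => [(true, p)] | none => []
    let tail := match suffix with | some s => [(true, s)] | none => []
    head ++ body ++ tail

-- ===== PRECONDITION & SPEC =====
def Spec_tween (iterable : List String) (delim : String) (prefix_ : Option String) (suffix : Option String) (out : List (Bool × String)) : Prop := out = tween_alt iterable delim prefix_ suffix
instance (iterable : List String) (delim : String) (prefix_ : Option String) (suffix : Option String) (out : List (Bool × String)) : Decidable (Spec_tween iterable delim prefix_ suffix out) := by unfold Spec_tween; infer_instance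

-- ===== CLAIM (what is proved, stated in full; the proofs are below) =====
def Claim_equal_tween : Prop := ∀ (iterable : List String) (delim : String) (prefix_ : Option String) (suffix : Option String), Dom_tween iterable delim prefix_ suffix → Spec_tween iterable delim prefix_ suffix (tween iterable delim prefix_ suffix)

-- ===== LEMMAS AND PROOFS =====

-- invariant for A's loop once 'first' is false: it appends uniform delim/item pairs
theorem tweenLoop_false (rest : List String) (delim : String) (prefix_ : Option String)
    (acc : List (Bool × String)) :
    tweenLoop delim prefix_ rest (acc, false)
    = (acc ++ rest.flatMap (fun i => [(true, delim), (false, i)]), false) := by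
  induction rest generalizing acc with
  | nil => simp [tweenLoop]
  | cons y ys ih => simpa [tweenLoop, List.foldl] using ih (acc ++ [(true, delim), (false, y)])

-- ===== VERDICT (by name: the statement is the Claim_ definition above) =====
theorem tween_spec : Claim_equal_tween := by
  intro iterable delim prefix_ suffix _
  unfold Spec_tween tween tween_alt
  cases iterable with
  | nil => cases suffix <;> simp [tweenLoop]
  | cons x rest =>
    have h1 : tweenLoop delim prefix_ (x :: rest) (([], true) : List (Bool × String) × Bool)
        = tweenLoop delim prefix_ rest
            ((match prefix_ with | some p => [(true, p)] | none => []) ++ [(false, x)], false) := by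
      cases prefix_ <;> rfl
    rw [h1, tweenLoop_false]
    cases suffix <;> cases prefix_ <;> simp [PySem.List.slice_from_one]
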